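-- pv_equiv track=rewrite | github.com/KebabRonin/AI | Tema1.py | is_final
-- ===== SOURCE A (Python) =====
-- def is_final(state):
--     next_nr = 1
--     for i in state[0]:
--         if i == next_nr:
--             next_nr += 1
--         elif i != 0:
--             return False
--     return True
-- ===== SOURCE B (Python) =====
-- def is_final(state):
--     nums = [x for x in state[0] if x != 0]
--     return nums == list(range(1, len(nums) + 1))
-- ===== Notes on version B (the rewrite author's own statement) =====
-- stated objective: simpler
-- what changed: Replaces A's stateful counter-with-early-return scan by filtering out the zeros and comparing the remaining values to range(1, k+1) in one equality.
import Mathlib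
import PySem

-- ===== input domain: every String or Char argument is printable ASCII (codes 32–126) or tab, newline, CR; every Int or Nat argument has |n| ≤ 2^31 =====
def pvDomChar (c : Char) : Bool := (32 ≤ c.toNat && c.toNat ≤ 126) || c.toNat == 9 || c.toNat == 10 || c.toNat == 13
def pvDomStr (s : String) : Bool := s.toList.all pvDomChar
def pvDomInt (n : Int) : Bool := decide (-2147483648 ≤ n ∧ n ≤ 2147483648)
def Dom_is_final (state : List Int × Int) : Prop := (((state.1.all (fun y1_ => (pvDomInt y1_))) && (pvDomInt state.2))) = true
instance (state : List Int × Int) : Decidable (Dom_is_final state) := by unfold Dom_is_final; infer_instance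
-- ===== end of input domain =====

-- B filters out the zeros and compares the rest to range(1,k+1) in one equality,
-- replacing A's counter-with-early-return scan (objective: simpler).


-- ===== PORT A =====
-- the for-loop over state[0] with the counter next_nr and the early 'return False'
def isFinalLoop : Int → List Int → Bool
  | _, [] => true
  | next_nr, i :: t =>
      if i = next_nr then isFinalLoop (next_nr + 1) t
      else if i ≠ 0 then false
      else isFinalLoop next_nr t

def is_final (state : List Int × Int) : Bool := isFinalLoop 1 state.1

-- ===== PORT B =====
def is_final_alt (state : List Int × Int) : Bool :=
  let nums := state.1.filter (fun x => x != 0)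
  nums == PySem.List.pyRange 1 ((nums.length : Int) + 1) 1

-- ===== PRECONDITION & SPEC =====
def Spec_is_final (state : List Int × Int) (out : Bool) : Prop := out = is_final_alt state
instance (state : List Int × Int) (out : Bool) : Decidable (Spec_is_final state out) := by unfold Spec_is_final; infer_instance

-- ===== CLAIM (what is proved, stated in full; the proofs are below) =====
def Claim_equal_is_final : Prop := ∀ (state : List Int × Int), Dom_is_final state → Spec_is_final state (is_final state)

-- ===== LEMMAS AND PROOFS =====
theorem isFinalLoop_iff (l : List Int) : ∀ n : Int, 1 ≤ n →
    (isFinalLoop n l = true ↔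
      l.filter (fun x => x != 0) =
        PySem.List.pyRange n (n + (l.filter (fun x => x != 0)).length) 1) := by
  induction l with
  | nil =>
    intro n _
    simp [isFinalLoop, PySem.List.pyRange_one_eq_nil (le_refl n)]
  | cons i t ih =>
    intro n hn
    by_cases hi : i = n
    · have hne : (i != 0) = true := by simp [hi]; omega
      rw [show isFinalLoop n (i :: t) = isFinalLoop (n + 1) t from by simp [isFinalLoop, hi],
        List.filter_cons, if_pos hne, ih (n + 1) (by omega)]
      have hcons : PySem.List.pyRange n (n + ((i :: t.filter (fun x => x != 0)).length : Int)) 1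
          = n :: PySem.List.pyRange (n + 1) ((n + 1) + ((t.filter (fun x => x != 0)).length : Int)) 1 := by
        rw [show n + ((i :: t.filter (fun x => x != 0)).length : Int)
            = (n + 1) + ((t.filter (fun x => x != 0)).length : Int) from by
              push_cast [List.length_cons]; omega,
          PySem.List.pyRange_one_cons (by omega)]
      rw [hcons]
      constructor
      · intro h; exact List.cons_eq_cons.mpr ⟨hi, h⟩
      · intro h; exact (List.cons_eq_cons.mp h).2
    · by_cases hz : i = 0
      · have hzf : (i != 0) = false := by simp [hz]
        rw [show isFinalLoop n (i :: t) = isFinalLoop n t from by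
            subst hz; simp [isFinalLoop, hi],
          List.filter_cons, if_neg (by simp [hzf])]
        exact ih n hn
      · have hne : (i != 0) = true := by simp [hz]
        rw [show isFinalLoop n (i :: t) = false from by simp [isFinalLoop, hi, hz],
          List.filter_cons, if_pos hne,
          PySem.List.pyRange_one_cons (by push_cast [List.length_cons]; omega)]
        constructor
        · intro h; simp at h
        · intro h; exact absurd (List.cons_eq_cons.mp h).1 hi

-- ===== VERDICT (by name: the statement is the Claim_ definition above) =====
theorem is_final_spec : Claim_equal_is_final := by
  intro state _
  unfold Spec_is_final is_final is_final_alt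
  rw [Bool.eq_iff_iff]
  rw [isFinalLoop_iff state.1 1 le_rfl]
  rw [show (1 : Int) + ((state.1.filter (fun x => x != 0)).length : Int)
      = ((state.1.filter (fun x => x != 0)).length : Int) + 1 from by omega]
  simp
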